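-- pv_equiv track=rewrite | github.com/Barebore/Algorithms | Tinkoff tasks/1.py | cout_ugly_words
-- ===== SOURCE A (Python) =====
-- def cout_ugly_words(departaments, colors_char):
--     departaments_list = list(departaments.split()) # даелам список слов
--     color_index = 0 # индекс символа в строке с цветами
--     ugly_words = 0 #счётчик некрасивых слов
--     for word in departaments_list: # для каждого слова в списке слов
--         flag = 0
--         for _ in range(len(word)-1): # цикл от 0 до длины_слова - 1
--             current_char = colors_char[color_index]
--             next_char = colors_char[color_index + 1]
--             if current_char == next_char:
--                 flag = 1
--             color_index +=1
--         color_index +=1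
--         ugly_words += flag
--     return ugly_words
-- ===== SOURCE B (Python) =====
-- def cout_ugly_words(departaments, colors_char):
--     # prefix sums over adjacency indicators: pref[i] = number of j < i with colors_char[j] == colors_char[j+1]
--     pref = [0]
--     run = 0
--     for a, b in zip(colors_char, colors_char[1:]):
--         run += a == b
--         pref.append(run)
--     count = 0
--     start = 0
--     for word in departaments.split():
--         end = start + len(word) - 1
--         if end > start and pref[end] - pref[start] > 0:
--             count += 1
--         start = end + 1
--     return count
-- ===== Notes on version B (the rewrite author's own statement) =====
-- stated objective: alternative
-- what changed: B precomputes one prefix-sum array of adjacent-equal indicators over colors_char and decides each word by a constant-time range query over [start, start+len-1], instead of A's per-word inner character loop carrying a flag and a running color_index.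
import Mathlib
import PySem

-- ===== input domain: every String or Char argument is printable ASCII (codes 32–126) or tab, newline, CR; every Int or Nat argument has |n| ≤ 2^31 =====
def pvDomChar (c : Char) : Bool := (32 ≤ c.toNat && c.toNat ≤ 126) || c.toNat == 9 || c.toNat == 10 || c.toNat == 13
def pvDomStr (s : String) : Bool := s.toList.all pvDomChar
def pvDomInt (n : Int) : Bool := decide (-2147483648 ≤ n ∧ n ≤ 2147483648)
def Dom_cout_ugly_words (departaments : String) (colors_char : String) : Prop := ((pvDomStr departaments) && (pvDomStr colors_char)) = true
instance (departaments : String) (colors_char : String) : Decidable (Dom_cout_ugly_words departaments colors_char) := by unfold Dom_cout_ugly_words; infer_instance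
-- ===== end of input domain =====

-- B replaces A's per-word inner character loop (running color_index + flag) by one prefix-sum
-- array of adjacent-equal indicators over colors_char and a range query per word (alternative decomposition).

-- ===== PORT A =====
def cout_ugly_words (departaments : String) (colors_char : String) : Int :=
  let departaments_list := PySem.Str.split₀ departaments
  let r := departaments_list.foldl
    (fun (st : Option (Int × Int)) word =>
      match st with
      | none => none
      | some (color_index, ugly_words) =>
        let inner := (PySem.List.pyRange 0 (PySem.Str.len word - 1) 1).foldl
          (fun (ist : Option (Int × Int)) _ =>
            match ist with
            | none => none
            | some (flag, ci) =>
              match PySem.Str.pyGet? colors_char ci, PySem.Str.pyGet? colors_char (ci + 1) with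
              | some current_char, some next_char =>
                  some (if current_char == next_char then 1 else flag, ci + 1)
              | _, _ => none)
          (some (0, color_index))
        match inner with
        | none => none
        | some (flag, ci) => some (ci + 1, ugly_words + flag))
    (some (0, 0))
  match r with
  | some (_, ugly_words) => ugly_words
  | none => 0

-- ===== PORT B =====
def cout_ugly_words_alt (departaments : String) (colors_char : String) : Int :=
  let cs := colors_char.toList
  let pr := (List.zip cs cs.tail).foldl
    (fun (st : List Int × Int) ab =>
      let run := st.2 + (if ab.1 == ab.2 then (1 : Int) else 0)
      (st.1 ++ [run], run))
    ([0], 0)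
  let pref := pr.1
  let r := (PySem.Str.split₀ departaments).foldl
    (fun (st : Option (Int × Int)) word =>
      st.bind (fun cp =>
        let count := cp.1
        let start := cp.2
        let endi := start + PySem.Str.len word - 1
        if endi > start then
          (PySem.List.pyGet? pref endi).bind (fun pe =>
            (PySem.List.pyGet? pref start).bind (fun ps =>
              some ((if pe - ps > 0 then count + 1 else count), endi + 1)))
        else some (count, endi + 1)))
    (some (0, 0))
  ((r.map (fun cp => cp.1)).getD 0)

-- ===== PRECONDITION & SPEC =====
-- bounds check: each word of length ≥ 2 lies entirely inside the first n colour characters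
-- (word i occupies positions [start_i, start_i + len_i), starts accumulating from s)
def pvFits (ws : List (List Char)) (s n : Nat) : Bool :=
  match ws with
  | [] => true
  | w :: rest => (w.length < 2 || s + w.length ≤ n) && pvFits rest (s + w.length) n

-- Pre_ excludes exactly the inputs on which A raises IndexError (colors_char too short
-- for some word of length ≥ 2); B raises IndexError on those same inputs.
def Pre_cout_ugly_words (departaments : String) (colors_char : String) : Prop :=
  pvFits ((PySem.Str.split₀ departaments).map String.toList) 0 colors_char.toList.length = true
instance (departaments : String) (colors_char : String) : Decidable (Pre_cout_ugly_words departaments colors_char) := by unfold Pre_cout_ugly_words; infer_instance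

def pvWitness_cout_ugly_words : String × String := ("ab cd", "xxyz")

def Spec_cout_ugly_words (departaments : String) (colors_char : String) (out : Int) : Prop := out = cout_ugly_words_alt departaments colors_char
instance (departaments : String) (colors_char : String) (out : Int) : Decidable (Spec_cout_ugly_words departaments colors_char out) := by unfold Spec_cout_ugly_words; infer_instance

-- ===== CLAIM (what is proved, stated in full; the proofs are below) =====
def Claim_equal_cout_ugly_words : Prop := ∀ (departaments : String) (colors_char : String), Dom_cout_ugly_words departaments colors_char → Pre_cout_ugly_words departaments colors_char → Spec_cout_ugly_words departaments colors_char (cout_ugly_words departaments colors_char)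

-- ===== LEMMAS AND PROOFS =====

theorem cout_ugly_words_witness_ok :
    Dom_cout_ugly_words pvWitness_cout_ugly_words.1 pvWitness_cout_ugly_words.2 ∧
    Pre_cout_ugly_words pvWitness_cout_ugly_words.1 pvWitness_cout_ugly_words.2 := by decide

-- number of adjacent-equal pairs, as an Int
def pvCnt (zs : List (Char × Char)) : Int := (zs.countP (fun ab => ab.1 == ab.2) : Int)

theorem pvCnt_cons (ab : Char × Char) (zs : List (Char × Char)) :
    pvCnt (ab :: zs) = (if ab.1 == ab.2 then 1 else 0) + pvCnt zs := by
  simp only [pvCnt, List.countP_cons]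
  split
  · simp
    omega
  · simp

theorem pvCnt_nonneg (zs : List (Char × Char)) : 0 ≤ pvCnt zs := by
  simp [pvCnt]

theorem pvCnt_append (xs ys : List (Char × Char)) :
    pvCnt (xs ++ ys) = pvCnt xs + pvCnt ys := by
  simp [pvCnt, List.countP_append]

theorem pvCnt_eq_sum (zs : List (Char × Char)) :
    ((zs.map (fun ab => if ab.1 == ab.2 then (1 : Int) else 0)).sum) = pvCnt zs := by
  induction zs with
  | nil => rfl
  | cons ab zs ih =>
      simp only [List.map_cons, List.sum_cons, pvCnt_cons, ih]

-- every word python's str.split() produces is nonempty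
theorem split₀_go_ne_nil :
    ∀ (s cur : List Char) (acc : List (List Char)), (∀ w ∈ acc, w ≠ []) →
      ∀ w ∈ PySem.Chars.split₀.go s cur acc, w ≠ [] := by
  intro s
  induction s with
  | nil =>
      intro cur acc hacc w hw
      simp only [PySem.Chars.split₀.go] at hw
      split at hw
      · exact hacc w (by simpa using hw)
      · rename_i hcur
        rcases (by simpa using hw : w ∈ acc ∨ w = cur.reverse) with h | h
        · exact hacc w h
        · subst h
          simp only [List.isEmpty_iff] at hcur
          intro h
          exact hcur (by simpa using congrArg List.reverse h)
  | cons c rest ih =>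
      intro cur acc hacc w hw
      simp only [PySem.Chars.split₀.go] at hw
      split at hw
      · split at hw
        · exact ih [] acc hacc w hw
        · rename_i hcur
          refine ih [] (cur.reverse :: acc) ?_ w hw
          intro v hv
          rcases List.mem_cons.mp hv with h | h
          · subst h
            simp only [List.isEmpty_iff] at hcur
            intro h
            exact hcur (by simpa using congrArg List.reverse h)
          · exact hacc _ h
      · exact ih (c :: cur) acc hacc w hw

theorem split₀_mem_ne_nil (cs : List Char) (w : List Char)
    (hw : w ∈ PySem.Chars.split₀ cs) : w ≠ [] :=
  split₀_go_ne_nil cs [] [] (by simp) w hw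

-- folding a state update that ignores the list element is iteration
theorem foldl_ignore {α β : Type} (g : α → α) :
    ∀ (l : List β) (st : α), l.foldl (fun s _ => g s) st = g^[l.length] st := by
  intro l
  induction l with
  | nil => intro st; rfl
  | cons x xs ih => intro st; simp [List.foldl_cons, ih, Function.iterate_succ_apply]

-- the prefix-sum list B builds
theorem pref_build (f : Char × Char → Int) :
    ∀ (zs : List (Char × Char)) (p : List Int) (r : Int),
      (zs.foldl (fun (st : List Int × Int) ab =>
          (st.1 ++ [st.2 + f ab], st.2 + f ab)) (p, r)) =
      (p ++ (List.range zs.length).map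
          (fun i => r + ((zs.take (i+1)).map f).sum),
       r + (zs.map f).sum) := by
  intro zs
  induction zs with
  | nil =>
      intro p r
      simp only [List.foldl_nil, List.length_nil, List.range_zero, List.map_nil,
        List.append_nil, List.sum_nil, add_zero]
  | cons ab zs ih =>
      intro p r
      simp only [List.foldl_cons, ih]
      refine Prod.ext ?_ ?_
      · simp only [List.length_cons, List.range_succ_eq_map, List.map_cons, List.map_map,
          List.take_succ_cons, List.map_cons, List.sum_cons, List.take_zero, List.map_nil,
          List.sum_nil, List.cons_append, List.append_assoc]
        simp only [List.nil_append, Function.comp_def, add_zero]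
        congr 1
        congr 1
        apply List.map_congr_left
        intro i _
        simp only [Nat.succ_eq_add_one]
        ring
      · simp only [List.map_cons, List.sum_cons]
        ring

-- A's inner loop step
def pvStepA (cs : List Char) (ist : Option (Int × Int)) : Option (Int × Int) :=
  match ist with
  | none => none
  | some (flag, ci) =>
    match PySem.List.pyGet? cs ci, PySem.List.pyGet? cs (ci + 1) with
    | some current_char, some next_char =>
        some (if current_char == next_char then 1 else flag, ci + 1)
    | _, _ => none

theorem inner_spec (cs : List Char) :
    ∀ (k s : Nat) (flag : Int), s + k + 1 ≤ cs.length →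
      (pvStepA cs)^[k] (some (flag, (s : Int))) =
      some ((if 0 < pvCnt (((cs.zip cs.tail).drop s).take k) then 1 else flag),
            (s : Int) + k) := by
  intro k
  induction k with
  | zero => intro s flag _; simp [pvCnt]
  | succ k ih =>
      intro s flag h
      have hs : s < cs.length := by omega
      have hs1 : s + 1 < cs.length := by omega
      rw [Function.iterate_succ_apply]
      have hstep : pvStepA cs (some (flag, (s : Int))) =
          some ((if cs[s] == cs[s+1] then 1 else flag), ((s + 1 : Nat) : Int)) := by
        have hcast : ((s : Int) + 1) = ((s + 1 : Nat) : Int) := by push_cast; ring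
        simp only [pvStepA, hcast, PySem.List.pyGet?_natCast,
          List.getElem?_eq_getElem hs1, List.getElem?_eq_getElem hs]
      rw [hstep, ih (s + 1) _ (by omega)]
      have hzlen : s < (cs.zip cs.tail).length := by
        simp only [List.length_zip, List.length_tail]
        omega
      have hdrop : (cs.zip cs.tail).drop s
          = (cs.zip cs.tail)[s] :: (cs.zip cs.tail).drop (s + 1) :=
        List.drop_eq_getElem_cons hzlen
      have hz : (cs.zip cs.tail)[s] = (cs[s], cs[s+1]) := by
        simp [List.getElem_zip, List.getElem_tail]
      refine congrArg some (Prod.ext ?_ ?_)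
      · rw [hdrop]
        simp only [List.take_succ_cons, pvCnt_cons, hz]
        by_cases hc : cs[s] == cs[s+1]
        · simp only [hc, if_true]
          have hpos : (0:Int) < 1 + pvCnt (((cs.zip cs.tail).drop (s + 1)).take k) := by
            have := pvCnt_nonneg (((cs.zip cs.tail).drop (s + 1)).take k)
            omega
          simp [hpos]
        · simp only [hc, Bool.false_eq_true, if_false]
          simp
      · push_cast; ring

theorem inner_fold (cs : List Char) (rng : List Int) (s : Nat) (flag : Int)
    (h : s + rng.length + 1 ≤ cs.length) :
    rng.foldl
      (fun (ist : Option (Int × Int)) _ =>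
        match ist with
        | none => none
        | some (fl, ci) =>
          match PySem.List.pyGet? cs ci, PySem.List.pyGet? cs (ci + 1) with
          | some current_char, some next_char =>
              some (if current_char == next_char then 1 else fl, ci + 1)
          | _, _ => none)
      (some (flag, (s : Int))) =
    some ((if 0 < pvCnt (((cs.zip cs.tail).drop s).take rng.length) then 1 else flag),
          (s : Int) + rng.length) := by
  show rng.foldl (fun ist _ => pvStepA cs ist) (some (flag, (s : Int))) = _
  rw [foldl_ignore (pvStepA cs) rng]
  exact inner_spec cs rng.length s flag h

-- main induction: A's outer fold and B's outer fold track the same position and count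
theorem outer_spec (colors_char : String) (pref : List Int)
    (hpref : ∀ i : Nat,
      i ≤ (colors_char.toList.zip colors_char.toList.tail).length →
      pref[i]? = some (pvCnt ((colors_char.toList.zip colors_char.toList.tail).take i))) :
    ∀ (ws : List String) (s : Nat) (acc : Int),
      pvFits (ws.map String.toList) s colors_char.toList.length = true →
      (∀ w ∈ ws, w.toList ≠ []) →
      ∃ c p : Int,
        (ws.foldl
          (fun (st : Option (Int × Int)) word =>
            match st with
            | none => none
            | some (color_index, ugly_words) =>
              let inner := (PySem.List.pyRange 0 (PySem.Str.len word - 1) 1).foldl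
                (fun (ist : Option (Int × Int)) _ =>
                  match ist with
                  | none => none
                  | some (flag, ci) =>
                    match PySem.Str.pyGet? colors_char ci, PySem.Str.pyGet? colors_char (ci + 1) with
                    | some current_char, some next_char =>
                        some (if current_char == next_char then 1 else flag, ci + 1)
                    | _, _ => none)
                (some (0, color_index))
              match inner with
              | none => none
              | some (flag, ci) => some (ci + 1, ugly_words + flag))
          (some ((s : Int), acc))) = some (p, c) ∧
        (ws.foldl
          (fun (st : Option (Int × Int)) word =>
            st.bind (fun cp =>
              let count := cp.1
              let start := cp.2
              let endi := start + PySem.Str.len word - 1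
              if endi > start then
                (PySem.List.pyGet? pref endi).bind (fun pe =>
                  (PySem.List.pyGet? pref start).bind (fun ps =>
                    some ((if pe - ps > 0 then count + 1 else count), endi + 1)))
              else some (count, endi + 1)))
          (some (acc, (s : Int)))) = some (c, p) := by
  intro ws
  induction ws with
  | nil =>
      intro s acc _ _
      exact ⟨acc, (s : Int), rfl, rfl⟩
  | cons w ws ih =>
      intro s acc hfits hne
      have hwne : w.toList ≠ [] := hne w (List.mem_cons_self)
      have hL1 : 0 < w.toList.length := List.length_pos_iff.mpr hwne
      simp only [List.map_cons, pvFits, Bool.and_eq_true, Bool.or_eq_true,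
        decide_eq_true_eq] at hfits
      obtain ⟨hhead, htail⟩ := hfits
      simp only [List.foldl_cons, PySem.Str.pyGet?_eq, PySem.Chars.pyGet?_eq_listPyGet?,
        PySem.Str.len_eq, gt_iff_lt, Option.bind_some] at ih ⊢
      by_cases h2 : 2 ≤ w.toList.length
      · -- word of length ≥ 2
        have hn : s + w.toList.length ≤ colors_char.toList.length := by
          rcases hhead with h | h
          · omega
          · exact h
        have hlen : (PySem.List.pyRange 0 ((w.toList.length : Int) - 1)).length
            = w.toList.length - 1 := by
          rw [PySem.List.length_pyRange_one]
          omega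
        rw [inner_fold colors_char.toList _ s 0 (by rw [hlen]; omega), hlen]
        rw [if_pos (by omega : ((s : Int)) < (s : Int) + ↑w.toList.length - 1)]
        rw [show ((s : Int) + ↑w.toList.length - 1)
            = ((s + w.toList.length - 1 : Nat) : Int) from by omega]
        simp only [PySem.List.pyGet?_natCast]
        have hzlen : (colors_char.toList.zip colors_char.toList.tail).length
            = colors_char.toList.length - 1 := by
          simp only [List.length_zip, List.length_tail]
          omega
        rw [hpref (s + w.toList.length - 1) (by omega), hpref s (by omega)]
        simp only [Option.bind_some]
        have hsub : pvCnt (List.take (s + w.toList.length - 1)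
              (colors_char.toList.zip colors_char.toList.tail))
            - pvCnt (List.take s (colors_char.toList.zip colors_char.toList.tail))
            = pvCnt (List.take (w.toList.length - 1)
                (List.drop s (colors_char.toList.zip colors_char.toList.tail))) := by
          rw [show s + w.toList.length - 1 = s + (w.toList.length - 1) from by omega,
            List.take_add, pvCnt_append]
          ring
        have htail' := htail
        have hcast1 : ((s : Int) + ↑(w.toList.length - 1) + 1)
            = ((s + w.toList.length : Nat) : Int) := by omega
        have hcast2 : ((s + w.toList.length - 1 : Nat) : Int) + 1
            = ((s + w.toList.length : Nat) : Int) := by omega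
        rw [hsub]
        by_cases hpos : 0 < pvCnt (List.take (w.toList.length - 1)
            (List.drop s (colors_char.toList.zip colors_char.toList.tail)))
        · rw [if_pos hpos, if_pos hpos]
          obtain ⟨c, p, hA, hB⟩ := ih (s + w.toList.length) (acc + 1) htail'
            (fun v hv => hne v (List.mem_cons_of_mem _ hv))
          refine ⟨c, p, ?_, ?_⟩
          · rw [← hA, hcast1]
          · rw [← hB, hcast2]
        · rw [if_neg hpos, if_neg hpos]
          obtain ⟨c, p, hA, hB⟩ := ih (s + w.toList.length) (acc + 0) htail'
            (fun v hv => hne v (List.mem_cons_of_mem _ hv))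
          refine ⟨c, p, ?_, ?_⟩
          · rw [← hA, hcast1]
          · rw [← hB, hcast2, show acc + 0 = acc from by ring]
      · -- word of length 1
        have hLe : w.toList.length = 1 := by omega
        rw [hLe]
        rw [PySem.List.pyRange_one_eq_nil (by omega), List.foldl_nil]
        rw [show ((s : Int) + ((1 : Nat) : Int) - 1) = (s : Int) from by omega]
        rw [if_neg (lt_irrefl ((s : Int)))]
        dsimp only
        rw [add_zero]
        have htail' : pvFits (List.map String.toList ws) (s + 1)
            colors_char.toList.length = true := by
          rwa [hLe] at htail
        obtain ⟨c, p, hA, hB⟩ := ih (s + 1) acc htail'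
          (fun v hv => hne v (List.mem_cons_of_mem _ hv))
        have hcast : ((s : Int) + 1) = ((s + 1 : Nat) : Int) := by omega
        refine ⟨c, p, ?_, ?_⟩
        · rw [← hA, hcast]
        · rw [← hB, hcast]

-- ===== VERDICT (by name: the statement is the Claim_ definition above) =====
theorem cout_ugly_words_spec : Claim_equal_cout_ugly_words := by
  intro departaments colors_char _ hpre
  unfold Spec_cout_ugly_words
  unfold cout_ugly_words cout_ugly_words_alt
  dsimp only
  rw [pref_build (fun ab => if ab.1 == ab.2 then (1 : Int) else 0)]
  dsimp only
  have hpref : ∀ i : Nat,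
      i ≤ (colors_char.toList.zip colors_char.toList.tail).length →
      (([0] ++ (List.range (colors_char.toList.zip colors_char.toList.tail).length).map
        (fun i => 0 + ((((colors_char.toList.zip colors_char.toList.tail).take (i+1)).map
          (fun ab => if ab.1 == ab.2 then (1 : Int) else 0)).sum)) : List Int))[i]?
      = some (pvCnt ((colors_char.toList.zip colors_char.toList.tail).take i)) := by
    intro i hi
    match i with
    | 0 =>
        simp [pvCnt]
    | Nat.succ j =>
        rw [List.singleton_append, List.getElem?_cons_succ, List.getElem?_map,
          List.getElem?_range (by omega)]
        simp only [Option.map_some, zero_add, pvCnt_eq_sum]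
  have hne : ∀ w ∈ PySem.Str.split₀ departaments, w.toList ≠ [] := by
    intro w hw
    have : PySem.Str.split₀ departaments
        = (PySem.Chars.split₀ departaments.toList).map String.ofList := rfl
    rw [this] at hw
    obtain ⟨l, hl, rfl⟩ := List.mem_map.mp hw
    have : (String.ofList l).toList = l := by simp
    rw [this]
    exact split₀_mem_ne_nil _ _ hl
  obtain ⟨c, p, hA, hB⟩ := outer_spec colors_char _ hpref
    (PySem.Str.split₀ departaments) 0 0 hpre hne
  simp only [Nat.cast_zero] at hA hB
  rw [hA, hB]
  rfl
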